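-- pv_equiv track=rewrite | github.com/851069793/pythonProject | pythonProject/期末复习/12-21-2.py | demo
-- ===== SOURCE A (Python) =====
-- def demo(s):
--     new_str = ""
--     for i in range(len(s)):
--         if (i + 1) % 3 == 0:
--             new_str += s[i-2:i+1][::-1]
--     if len(s) != len(new_str):
--         new_str += s[len(new_str):][::-1]
--     return new_str
-- ===== SOURCE B (Python) =====
-- def demo(s):
--     return ''.join(s[i:i+3][::-1] for i in range(0, len(s), 3))
-- ===== Notes on version B (the rewrite author's own statement) =====
-- stated objective: simpler
-- what changed: B iterates over chunk starts with range(0, len(s), 3) and joins each reversed 3-slice, replacing A's per-character scan with its (i+1)%3 guard, string-append accumulator and separate post-loop tail-reversal branch.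
import Mathlib
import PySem

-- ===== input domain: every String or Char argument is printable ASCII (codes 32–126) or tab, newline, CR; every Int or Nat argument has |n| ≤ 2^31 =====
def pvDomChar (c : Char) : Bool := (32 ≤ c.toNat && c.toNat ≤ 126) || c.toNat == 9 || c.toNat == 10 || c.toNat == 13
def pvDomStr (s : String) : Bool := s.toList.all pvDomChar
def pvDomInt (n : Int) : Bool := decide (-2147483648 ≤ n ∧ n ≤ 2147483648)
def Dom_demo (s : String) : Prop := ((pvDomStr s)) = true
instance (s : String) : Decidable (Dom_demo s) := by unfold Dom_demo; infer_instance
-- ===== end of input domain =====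

-- B replaces A's per-character scan ((i+1)%3 guard plus a post-loop tail-reversal branch)
-- by a single join over chunk starts range(0, len(s), 3); objective: simpler.

-- ===== PORT A =====
-- new_str accumulates as a List Char; s[...][::-1] is reverse (PySem.List.slice?_none_none_neg_one).
def demo (s : String) : String :=
  let L := s.toList
  let new : List Char :=
    (PySem.List.pyRange 0 (PySem.Str.len s) 1).foldl
      (fun new i =>
        if PySem.Int.mod (i + 1) 3 == 0 then
          new ++ (PySem.List.slice L (some (i - 2)) (some (i + 1))).reverse  -- s[i-2:i+1][::-1]
        else new) []
  let new :=
    if L.length ≠ new.length then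
      new ++ (PySem.List.slice L (some ((new.length : Int))) none).reverse  -- s[len(new_str):][::-1]
    else new
  String.ofList new

-- ===== PORT B =====
-- ''.join(s[i:i+3][::-1] for i in range(0, len(s), 3))
def demo_alt (s : String) : String :=
  String.ofList
    ((PySem.List.pyRange 0 (PySem.Str.len s) 3).foldl
      (fun acc i => acc ++ (PySem.List.slice s.toList (some i) (some (i + 3))).reverse) [])

-- ===== PRECONDITION & SPEC =====
def Spec_demo (s : String) (out : String) : Prop := out = demo_alt s
instance (s : String) (out : String) : Decidable (Spec_demo s out) := by unfold Spec_demo; infer_instance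

-- ===== CLAIM (what is proved, stated in full; the proofs are below) =====
def Claim_equal_demo : Prop := ∀ (s : String), Dom_demo s → Spec_demo s (demo s)

-- ===== LEMMAS AND PROOFS =====

-- complete 3-chunks only, each reversed
def chunkFull (l : List Char) : List Char :=
  if l.length < 3 then [] else (l.take 3).reverse ++ chunkFull (l.drop 3)
termination_by l.length
decreasing_by simp; omega

-- every 3-chunk reversed, including the final partial one
def chunkRev (l : List Char) : List Char :=
  if l = [] then [] else (l.take 3).reverse ++ chunkRev (l.drop 3)
termination_by l.length
decreasing_by
  rename_i h
  cases l with
  | nil => exact absurd rfl h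
  | cons a t => simp

lemma chunkFull_length (l : List Char) : (chunkFull l).length = l.length - l.length % 3 := by
  unfold chunkFull
  split
  · simp; omega
  · rename_i h
    rw [List.length_append, chunkFull_length (l.drop 3)]
    simp
    omega
termination_by l.length
decreasing_by simp; omega

lemma chunkRev_eq_chunkFull (l : List Char) :
    chunkRev l = chunkFull l ++ (l.drop (l.length - l.length % 3)).reverse := by
  unfold chunkRev chunkFull
  by_cases h3 : l.length < 3
  · have hm : l.length % 3 = l.length := Nat.mod_eq_of_lt h3
    rw [if_pos h3]
    split
    · rename_i h; subst h; simp
    · rename_i h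
      have : l.length - l.length % 3 = 0 := by omega
      rw [this]
      have hd : l.drop 3 = [] := List.drop_eq_nil_of_le (by omega)
      have ht : l.take 3 = l := List.take_of_length_le (by omega)
      rw [hd, ht, chunkRev]
      simp
  · have hne : l ≠ [] := by
      intro h; subst h; simp at h3
    rw [if_neg hne, if_neg h3, chunkRev_eq_chunkFull (l.drop 3)]
    have hlen : (l.drop 3).length = l.length - 3 := by simp
    have hmod : (l.drop 3).length % 3 = l.length % 3 := by rw [hlen]; omega
    have hdrop : (l.drop 3).drop ((l.drop 3).length - (l.drop 3).length % 3)
        = l.drop (l.length - l.length % 3) := by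
      rw [List.drop_drop]
      congr 1
      simp only [List.length_drop]
      omega
    rw [hdrop, List.append_assoc]
termination_by l.length
decreasing_by simp; omega

-- A's loop from a multiple-of-3 index j collects exactly the complete chunks of L.drop j
lemma foldA_eq (L : List Char) (k : Nat) :
    ∀ (j : Int) (acc : List Char), 0 ≤ j → j % 3 = 0 → ((L.length : Int) - j).toNat = k →
    (PySem.List.pyRange j (L.length : Int) 1).foldl
      (fun new i =>
        if PySem.Int.mod (i + 1) 3 == 0 then
          new ++ (PySem.List.slice L (some (i - 2)) (some (i + 1))).reverse
        else new) acc
      = acc ++ chunkFull (L.drop j.toNat) := by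
  induction k using Nat.strong_induction_on with
  | _ k ih =>
    intro j acc hj hj3 hk
    by_cases hlt : j < (L.length : Int)
    · by_cases hbig : j + 3 ≤ (L.length : Int)
      · -- three more indices j, j+1, j+2; only i = j+2 fires
        rw [PySem.List.pyRange_one_cons (by omega), PySem.List.pyRange_one_cons (by omega),
            PySem.List.pyRange_one_cons (by omega)]
        simp only [List.foldl_cons]
        rw [if_neg (show ¬((PySem.Int.mod (j + 1) 3 == 0) = true) by
              simp [PySem.Int.mod, Int.fmod_eq_emod]; omega),
            if_neg (show ¬((PySem.Int.mod (j + 1 + 1) 3 == 0) = true) by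
              simp [PySem.Int.mod, Int.fmod_eq_emod]; omega),
            if_pos (show (PySem.Int.mod (j + 1 + 1 + 1) 3 == 0) = true by
              simp [PySem.Int.mod, Int.fmod_eq_emod]; omega)]
        have hsl : PySem.List.slice L (some (j + 1 + 1 - 2)) (some (j + 1 + 1 + 1))
            = (L.drop j.toNat).take 3 := by
          have : j + 1 + 1 - 2 = j := by ring
          rw [this]
          have h3 : j + 1 + 1 + 1 = j + 3 := by ring
          rw [h3, PySem.List.slice_toNat _ hj (by omega)]
          congr 1
          omega
        rw [hsl]
        have hrec := ih (((L.length : Int) - (j + 3)).toNat) (by omega) (j + 3)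
          (acc ++ ((L.drop j.toNat).take 3).reverse) (by omega) (by omega) rfl
        rw [show j + 1 + 1 + 1 = j + 3 from by ring, hrec]
        have hdrop : L.drop (j + 3).toNat = (L.drop j.toNat).drop 3 := by
          rw [List.drop_drop]
          congr 1
          omega
        rw [hdrop, List.append_assoc]
        congr 1
        conv_rhs => rw [chunkFull]
        rw [if_neg (by simp; omega)]
      · -- one or two trailing indices, none fires
        have hch : chunkFull (L.drop j.toNat) = [] := by
          rw [chunkFull, if_pos (by simp; omega)]
        rw [hch, List.append_nil]
        by_cases h1 : j + 1 = (L.length : Int)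
        · rw [PySem.List.pyRange_one_cons (by omega), PySem.List.pyRange_one_eq_nil (by omega)]
          simp only [List.foldl_cons, List.foldl_nil]
          have e1 : (PySem.Int.mod (j + 1) 3 == 0) = false := by
            simp [PySem.Int.mod, Int.fmod_eq_emod]; omega
          rw [e1]
          simp
        · rw [PySem.List.pyRange_one_cons (by omega), PySem.List.pyRange_one_cons (by omega),
              PySem.List.pyRange_one_eq_nil (by omega)]
          simp only [List.foldl_cons, List.foldl_nil]
          have e1 : (PySem.Int.mod (j + 1) 3 == 0) = false := by
            simp [PySem.Int.mod, Int.fmod_eq_emod]; omega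
          have e2 : (PySem.Int.mod (j + 1 + 1) 3 == 0) = false := by
            simp [PySem.Int.mod, Int.fmod_eq_emod]; omega
          rw [e1, e2]
          simp
    · rw [PySem.List.pyRange_one_eq_nil (by omega)]
      have : L.drop j.toNat = [] := List.drop_eq_nil_of_le (by omega)
      rw [this, List.foldl_nil, chunkFull, if_pos (by simp)]
      simp

-- a cons unfolding for range(a, b, 3)
lemma pyRange3_cons (a b : Int) (h : a < b) :
    PySem.List.pyRange a b 3 = a :: PySem.List.pyRange (a + 3) b 3 := by
  rw [PySem.List.pyRange_of_pos a b (by norm_num),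
      PySem.List.pyRange_of_pos (a + 3) b (by norm_num)]
  rw [if_pos h]
  by_cases h3 : a + 3 < b
  · rw [if_pos h3]
    have : ((b - a + 3 - 1) / 3).toNat = ((b - (a + 3) + 3 - 1) / 3).toNat + 1 := by omega
    rw [this, List.range_succ_eq_map]
    simp only [List.map_cons, List.map_map]
    congr 1
    · ring
    · apply List.map_congr_left
      intro x _
      simp only [Function.comp_apply]
      push_cast
      ring
  · rw [if_neg h3]
    have : ((b - a + 3 - 1) / 3).toNat = 1 := by omega
    rw [this]
    simp

lemma foldB_eq (L : List Char) (k : Nat) :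
    ∀ (j : Int) (acc : List Char), 0 ≤ j → ((L.length : Int) - j).toNat = k →
    (PySem.List.pyRange j (L.length : Int) 3).foldl
      (fun acc i => acc ++ (PySem.List.slice L (some i) (some (i + 3))).reverse) acc
      = acc ++ chunkRev (L.drop j.toNat) := by
  induction k using Nat.strong_induction_on with
  | _ k ih =>
    intro j acc hj hk
    by_cases hlt : j < (L.length : Int)
    · rw [pyRange3_cons _ _ hlt]
      simp only [List.foldl_cons]
      have hsl : PySem.List.slice L (some j) (some (j + 3)) = (L.drop j.toNat).take 3 := by
        rw [PySem.List.slice_toNat _ hj (by omega)]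
        congr 1
        omega
      rw [hsl]
      have hrec := ih (((L.length : Int) - (j + 3)).toNat) (by omega) (j + 3)
        (acc ++ ((L.drop j.toNat).take 3).reverse) (by omega) rfl
      rw [hrec]
      have hdrop : L.drop (j + 3).toNat = (L.drop j.toNat).drop 3 := by
        rw [List.drop_drop]
        congr 1
        omega
      rw [hdrop, List.append_assoc]
      congr 1
      conv_rhs => rw [chunkRev]
      rw [if_neg (by
        intro hnil
        have := congrArg List.length hnil
        simp at this
        omega)]
    · rw [PySem.List.pyRange_of_pos j _ (by norm_num), if_neg (by omega)]
      have : L.drop j.toNat = [] := List.drop_eq_nil_of_le (by omega)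
      rw [this, chunkRev]
      simp

-- ===== VERDICT (by name: the statement is the Claim_ definition above) =====
theorem demo_spec : Claim_equal_demo := by
  intro s _
  unfold Spec_demo demo demo_alt
  simp only [PySem.Str.len_eq_length]
  set L := s.toList with hL
  rw [show ((s.length : Int)) = ((L.length : Int)) from by simp [hL]]
  have hA := foldA_eq L ((L.length : Int) - 0).toNat 0 [] le_rfl rfl rfl
  have hB := foldB_eq L ((L.length : Int) - 0).toNat 0 [] le_rfl rfl
  simp only [Int.toNat_zero, List.drop_zero, List.nil_append] at hA hB
  rw [hA, hB, chunkRev_eq_chunkFull L]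
  rw [chunkFull_length L]
  by_cases h0 : L.length % 3 = 0
  · rw [if_neg (by omega)]
    rw [h0, Nat.sub_zero, List.drop_length]
    simp
  · rw [if_pos (by omega)]
    rw [PySem.List.slice_from _ (by positivity)]
    simp
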